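-- pv_equiv track=rewrite | github.com/Justmilomb/StockMarketAI | autoresearch/runner.py | _count_consecutive_rejects
-- ===== SOURCE A (Python) =====
-- from typing import Any, Dict, List, Optional, Tuple
--
-- def _count_consecutive_rejects(recent: List[Dict]) -> int:
--     """Count how many of the most recent experiments were rejected."""
--     count = 0
--     for exp in reversed(recent):
--         if exp.get("decision") == "REJECTED":
--             count += 1
--         else:
--             break
--     return count
-- ===== SOURCE B (Python) =====
-- from typing import Any, Dict, List, Optional, Tuple
--
-- def _count_consecutive_rejects(recent: List[Dict]) -> int:
--     """Count how many of the most recent experiments were rejected."""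
--     count = 0
--     for exp in recent:
--         if exp.get("decision") == "REJECTED":
--             count += 1
--         else:
--             count = 0
--     return count
-- ===== Notes on version B (the rewrite author's own statement) =====
-- stated objective: alternative
-- what changed: Single forward pass with a running run-length counter that resets on non-REJECTED, instead of iterating the reversed list with an early break.
import Mathlib
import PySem

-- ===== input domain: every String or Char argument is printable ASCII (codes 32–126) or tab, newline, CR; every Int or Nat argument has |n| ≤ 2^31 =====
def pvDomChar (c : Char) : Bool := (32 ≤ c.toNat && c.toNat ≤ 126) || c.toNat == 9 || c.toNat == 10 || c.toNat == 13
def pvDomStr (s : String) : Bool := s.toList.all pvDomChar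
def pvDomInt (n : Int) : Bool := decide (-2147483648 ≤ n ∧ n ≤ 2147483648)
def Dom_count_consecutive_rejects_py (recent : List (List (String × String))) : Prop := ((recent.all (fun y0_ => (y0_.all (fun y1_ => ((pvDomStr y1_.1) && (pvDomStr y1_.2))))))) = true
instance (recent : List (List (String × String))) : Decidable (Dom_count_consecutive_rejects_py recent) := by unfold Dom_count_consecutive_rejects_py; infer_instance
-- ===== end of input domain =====

-- B replaces A's reversed iteration with early break by a single forward pass
-- maintaining a running run-length reset on non-REJECTED (objective: alternative).

-- ===== PORT A =====
-- exp.get("decision") == "REJECTED" (missing key gives None, which compares ≠)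
def pvRejected (exp : List (String × String)) : Bool :=
  (PySem.Dict.mk exp).get? "decision" == some "REJECTED"

-- the 'for exp in reversed(recent)' loop with its break, carrying count
def pvALoop : List (List (String × String)) → Int → Int
  | [], count => count
  | exp :: rest, count =>
      if pvRejected exp then pvALoop rest (count + 1) else count

def count_consecutive_rejects_py (recent : List (List (String × String))) : Int :=
  pvALoop recent.reverse 0

-- ===== PORT B =====
def count_consecutive_rejects_py_alt (recent : List (List (String × String))) : Int :=
  recent.foldl (fun count exp => if pvRejected exp then count + 1 else 0) 0

-- ===== PRECONDITION & SPEC =====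
def Spec_count_consecutive_rejects_py (recent : List (List (String × String))) (out : Int) : Prop := out = count_consecutive_rejects_py_alt recent
instance (recent : List (List (String × String))) (out : Int) : Decidable (Spec_count_consecutive_rejects_py recent out) := by unfold Spec_count_consecutive_rejects_py; infer_instance

-- ===== CLAIM (what is proved, stated in full; the proofs are below) =====
def Claim_equal_count_consecutive_rejects_py : Prop := ∀ (recent : List (List (String × String))), Dom_count_consecutive_rejects_py recent → Spec_count_consecutive_rejects_py recent (count_consecutive_rejects_py recent)

-- ===== LEMMAS AND PROOFS =====
theorem pvALoop_acc (xs : List (List (String × String))) (c : Int) :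
    pvALoop xs c = c + pvALoop xs 0 := by
  induction xs generalizing c with
  | nil => simp [pvALoop]
  | cons x rest ih =>
    simp only [pvALoop]
    by_cases h : pvRejected x
    · simp [h]; rw [ih (c + 1), ih 1]; ring
    · simp [h]

theorem pvB_eq_A (recent : List (List (String × String))) :
    count_consecutive_rejects_py_alt recent = pvALoop recent.reverse 0 := by
  induction recent using List.reverseRecOn with
  | nil => rfl
  | append_singleton ys x ih =>
    simp only [count_consecutive_rejects_py_alt, List.foldl_append, List.foldl_cons,
      List.foldl_nil, List.reverse_append, List.reverse_cons, List.reverse_nil,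
      List.nil_append, List.cons_append, pvALoop]
    by_cases h : pvRejected x
    · simp [h, pvALoop_acc _ 1]
      rw [← ih]
      simp [count_consecutive_rejects_py_alt]
      ring
    · simp [h]

-- ===== VERDICT (by name: the statement is the Claim_ definition above) =====
theorem count_consecutive_rejects_py_spec : Claim_equal_count_consecutive_rejects_py := by
  intro recent _
  unfold Spec_count_consecutive_rejects_py count_consecutive_rejects_py
  exact (pvB_eq_A recent).symm
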